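-- pv_equiv track=rewrite | github.com/SEO-VA/sentiment-analyzer-tool-test | core/text_processor.py | validate_sentence_bounds
-- ===== SOURCE A (Python) =====
-- from typing import List, Dict, Any
--
-- def validate_sentence_bounds(sentence: str, spans: List[Dict]) -> bool:
--     """
--     Validate that spans fully cover the sentence with no overlaps
--     Returns True if valid, False otherwise
--     """
--     if not spans:
--         return False
--
--     # Sort spans by start position
--     sorted_spans = sorted(spans, key=lambda x: x['start'])
--
--     # Check bounds and coverage
--     sentence_len = len(sentence)
--
--     # First span should start at 0
--     if sorted_spans[0]['start'] != 0:
--         return False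
--
--     # Last span should end at sentence length
--     if sorted_spans[-1]['end'] != sentence_len:
--         return False
--
--     # Check for gaps or overlaps
--     for i in range(len(sorted_spans)):
--         span = sorted_spans[i]
--
--         # Check individual span bounds
--         if span['start'] < 0 or span['end'] > sentence_len or span['start'] >= span['end']:
--             return False
--
--         # Check for overlap with next span
--         if i + 1 < len(sorted_spans):
--             next_span = sorted_spans[i + 1]
--             if span['end'] > next_span['start']:
--                 return False
--             # Check for gaps
--             if span['end'] < next_span['start']:
--                 return False
--
--     return True
-- ===== SOURCE B (Python) =====
-- def validate_sentence_bounds(sentence: str, spans) -> bool: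
--     """Coverage-bitmap check: no sorting. Quick reject unless coverage can begin
--     at position 0; then mark each span's positions in a byte array: a double-mark
--     is an overlap, an unmarked cell at the end is a gap."""
--     if not spans:
--         return False
--     starts = [span['start'] for span in spans]
--     if min(starts) != 0:
--         return False
--     n = len(sentence)
--     covered = bytearray(n)
--     for span in spans:
--         start = span['start']
--         end = span['end']
--         if start < 0 or end > n or start >= end:
--             return False
--         if any(covered[start:end]):
--             return False
--         for i in range(start, end):
--             covered[i] = 1
--     return all(covered)
-- ===== Notes on version B (the rewrite author's own statement) =====
-- stated objective: alternative
-- what changed: Replaces A's sort-then-scan (sorted by start, neighbour lookahead for gaps/overlaps, separate first/last boundary tests) with an unsorted coverage bitmap: after a cheap reject unless the minimal start is 0, each span paints its positions in a byte array; a repainted cell is an overlap, an unpainted cell at the end is a gap.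
-- outside the precondition, e.g. on validate_sentence_bounds('xx', [{'start': 0}, {'start': 1, 'end': 5}]): A returns False, B raises KeyError
import Mathlib
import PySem

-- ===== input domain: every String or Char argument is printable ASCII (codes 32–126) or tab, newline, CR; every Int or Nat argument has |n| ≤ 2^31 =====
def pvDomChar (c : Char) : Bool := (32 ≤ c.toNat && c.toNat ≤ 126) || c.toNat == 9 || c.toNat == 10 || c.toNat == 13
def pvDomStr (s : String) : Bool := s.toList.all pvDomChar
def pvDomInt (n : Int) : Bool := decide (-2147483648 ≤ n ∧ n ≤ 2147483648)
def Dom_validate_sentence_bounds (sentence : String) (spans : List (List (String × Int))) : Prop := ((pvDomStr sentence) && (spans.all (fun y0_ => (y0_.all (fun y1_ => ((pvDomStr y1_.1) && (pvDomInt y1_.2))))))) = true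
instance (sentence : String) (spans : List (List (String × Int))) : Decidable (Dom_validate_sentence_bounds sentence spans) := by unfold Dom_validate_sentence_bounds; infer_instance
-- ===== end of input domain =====

-- B replaces A's sort + neighbour-lookahead scan by an unsorted coverage bitmap
-- (paint each span; a repainted cell is an overlap, an unpainted cell a gap);
-- same return value on every input where A returns.

-- d[k]: first-match association-list lookup; exact when k is present (guaranteed by Pre_,
-- outside of which Python raises KeyError and nothing is claimed).
def pvKey (d : List (String × Int)) (k : String) : Int := (d.lookup k).getD 0

-- ===== PORT A =====
-- A's `for i in range(len(sorted_spans))` loop with its i+1 lookahead, as recursion carrying the tail.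
def pvLoopA (L : Int) : List (List (String × Int)) → Bool
  | [] => true
  | s :: rest =>
    if pvKey s "start" < 0 ∨ pvKey s "end" > L ∨ pvKey s "start" ≥ pvKey s "end" then false
    else
      match rest with
      | [] => true
      | t :: _ =>
        if pvKey s "end" > pvKey t "start" then false
        else if pvKey s "end" < pvKey t "start" then false
        else pvLoopA L rest

def validate_sentence_bounds (sentence : String) (spans : List (List (String × Int))) : Bool :=
  if spans = [] then false
  else
    match PySem.List.sorted spans (fun x => pvKey x "start") false with
    | [] => false  -- unreachable: sorted list of a nonempty list is nonempty (sorted_spans[0] / [-1] below)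
    | h :: t =>
      let sentence_len := PySem.Str.len sentence
      if pvKey h "start" ≠ 0 then false
      else if pvKey ((h :: t).getLastD h) "end" ≠ sentence_len then false
      else pvLoopA sentence_len (h :: t)

-- ===== PORT B =====
-- `for i in range(start, end): covered[i] = 1`, rendered index-wise over the byte array
-- (exact: the loop sets exactly the positions i with start ≤ i < end, all < len(covered)
-- at the call site since bounds were checked).
def pvMark (cov : List Bool) (s e : Int) : List Bool :=
  cov.mapIdx (fun i b => if s ≤ (i : Int) ∧ (i : Int) < e then true else b)

-- B's single loop over the (unsorted) spans, carrying the coverage bitmap.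
def pvLoopB (L : Int) : List Bool → List (List (String × Int)) → Bool
  | cov, [] => cov.all id
  | cov, span :: rest =>
    if pvKey span "start" < 0 ∨ pvKey span "end" > L ∨ pvKey span "start" ≥ pvKey span "end" then false
    else if (PySem.List.slice cov (some (pvKey span "start")) (some (pvKey span "end"))).any id then false
    else pvLoopB L (pvMark cov (pvKey span "start") (pvKey span "end")) rest

def validate_sentence_bounds_alt (sentence : String) (spans : List (List (String × Int))) : Bool :=
  if spans = [] then false
  else
    match PySem.List.min? (spans.map (fun span => pvKey span "start")) (fun x => x) with
    | none => false  -- unreachable: min() of the starts of a nonempty list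
    | some m =>
      if m ≠ 0 then false
      else pvLoopB (PySem.Str.len sentence) (List.replicate (PySem.Str.len sentence).toNat false) spans

-- ===== PRECONDITION & SPEC =====
-- Pre_ excludes spans missing a 'start' key (Python A raises KeyError in the sort) and, when the
-- minimal start is 0 (so 'end' keys get read), spans missing an 'end' key: there one of the two
-- programs raises KeyError (B's loop always reads 'end'; A reads it unless an earlier span already
-- failed).  With a nonzero minimal start neither program reads 'end', so such spans stay inside Pre_.
def Pre_validate_sentence_bounds (sentence : String) (spans : List (List (String × Int))) : Prop :=
  ((spans.all (fun d => (d.lookup "start").isSome)) &&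
   ((spans.all (fun d => (d.lookup "end").isSome)) ||
    !((spans.any (fun d => (d.lookup "start").getD 0 == 0)) &&
      (spans.all (fun d => 0 ≤ (d.lookup "start").getD 0))))) = true
instance (sentence : String) (spans : List (List (String × Int))) : Decidable (Pre_validate_sentence_bounds sentence spans) := by unfold Pre_validate_sentence_bounds; infer_instance

def pvWitness_validate_sentence_bounds : String × (List (List (String × Int))) :=
  ("ab", [[("start", 0), ("end", 1)], [("start", 1), ("end", 2)]])

def Spec_validate_sentence_bounds (sentence : String) (spans : List (List (String × Int))) (out : Bool) : Prop := out = validate_sentence_bounds_alt sentence spans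
instance (sentence : String) (spans : List (List (String × Int))) (out : Bool) : Decidable (Spec_validate_sentence_bounds sentence spans out) := by unfold Spec_validate_sentence_bounds; infer_instance

-- ===== CLAIM (what is proved, stated in full; the proofs are below) =====
def Claim_equal_validate_sentence_bounds : Prop := ∀ (sentence : String) (spans : List (List (String × Int))), Dom_validate_sentence_bounds sentence spans → Pre_validate_sentence_bounds sentence spans → Spec_validate_sentence_bounds sentence spans (validate_sentence_bounds sentence spans)

-- ===== LEMMAS AND PROOFS =====

-- The common yardstick: every position 0 ≤ i < L is covered exactly once (counting a base
-- coverage), and every span is nonempty and within bounds.  Symmetric in the list order.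
def pvCnt (l : List (List (String × Int))) (i : Nat) : Nat :=
  l.countP (fun sp => decide (pvKey sp "start" ≤ (i : Int) ∧ (i : Int) < pvKey sp "end"))

def pvC (L : Int) (base : Nat → Nat) (l : List (List (String × Int))) : Prop :=
  (∀ sp ∈ l, 0 ≤ pvKey sp "start" ∧ pvKey sp "start" < pvKey sp "end" ∧ pvKey sp "end" ≤ L) ∧
  (∀ i : Nat, (i : Int) < L → base i + pvCnt l i = 1)

def pvAt (cov : List Bool) (i : Nat) : Bool := cov.getD i false

-- A's logic rephrased: the running-cursor acceptor on the sorted list (proof-side only).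
def pvCur (L : Int) (e : Int) : List (List (String × Int)) → Bool
  | [] => decide (e = L)
  | s :: rest =>
    if pvKey s "start" ≠ e ∨ pvKey s "start" ≥ pvKey s "end" then false
    else pvCur L (pvKey s "end") rest

theorem pvLoopA_head (L : Int) (s : List (String × Int)) (r : List (List (String × Int)))
    (h : pvLoopA L (s :: r) = true) :
    pvKey s "start" < pvKey s "end" ∧ pvKey s "end" ≤ L := by
  unfold pvLoopA at h
  split_ifs at h with h1
  · omega

-- A = cursor: the cursor run on the sorted list equals A's head check, loop and last-end check.
theorem pvCur_eq (L : Int) :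
    ∀ (r : List (List (String × Int))) (s : List (String × Int)) (e : Int), 0 ≤ e →
    pvCur L e (s :: r)
      = ((decide (pvKey s "start" = e)) && pvLoopA L (s :: r)
          && (decide (pvKey ((s :: r).getLastD s) "end" = L))) := by
  intro r
  induction r with
  | nil =>
    intro s e he
    simp only [pvCur, pvLoopA, List.getLastD_cons, List.getLastD_nil]
    split_ifs with hA hB hB <;> simp_all <;> omega
  | cons t r ih =>
    intro s e he
    have hrw : pvCur L e (s :: t :: r)
        = if pvKey s "start" ≠ e ∨ pvKey s "start" ≥ pvKey s "end" then false
          else pvCur L (pvKey s "end") (t :: r) := rfl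
    rw [hrw, List.getLastD_cons]
    by_cases h1 : pvKey s "start" = e
    · by_cases h2 : pvKey s "start" ≥ pvKey s "end"
      · have hb : pvKey s "start" < 0 ∨ pvKey s "end" > L ∨ pvKey s "start" ≥ pvKey s "end" := by omega
        have hl : pvLoopA L (s :: t :: r) = false := by unfold pvLoopA; rw [if_pos hb]
        simp [h2, hl]
      · have he' : 0 ≤ pvKey s "end" := by omega
        rw [if_neg (by tauto), ih t (pvKey s "end") he']
        simp only [List.getLastD_cons]
        have e1 : pvLoopA L (s :: t :: r)
            = if pvKey s "start" < 0 ∨ pvKey s "end" > L ∨ pvKey s "start" ≥ pvKey s "end" then false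
              else if pvKey s "end" > pvKey t "start" then false
              else if pvKey s "end" < pvKey t "start" then false
              else pvLoopA L (t :: r) := rfl
        by_cases h3 : pvKey t "start" = pvKey s "end"
        · by_cases h4 : pvKey s "end" > L
          · have hb : pvKey s "start" < 0 ∨ pvKey s "end" > L ∨ pvKey s "start" ≥ pvKey s "end" := by omega
            rw [e1, if_pos hb]
            by_cases h5 : pvLoopA L (t :: r) = true
            · have := pvLoopA_head L t r h5
              simp_all; omega
            · simp_all
          · rw [e1, if_neg (by omega), if_neg (by omega), if_neg (by omega)]
            simp [h1, h3]
        · have hl : pvLoopA L (s :: t :: r) = false := by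
            rw [e1]; split_ifs <;> first | rfl | omega
          simp [h3, hl]
    · rw [if_pos (Or.inl h1)]
      simp [h1]

-- cursor never accepts once it has run past L
theorem pvCur_gt (L : Int) : ∀ (l : List (List (String × Int))) (e : Int), L < e → pvCur L e l = false := by
  intro l
  induction l with
  | nil => intro e he; simp [pvCur]; omega
  | cons s r ih =>
    intro e he
    unfold pvCur
    split_ifs with h
    · rfl
    · exact ih _ (by omega)

-- cursor characterization: on a start-sorted list, accept iff pvC with the prefix base.
theorem pvCur_char (L : Int) :
    ∀ (l : List (List (String × Int))),
      l.Pairwise (fun a b => pvKey a "start" ≤ pvKey b "start") →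
      ∀ e : Int, 0 ≤ e → e ≤ L →
      (pvCur L e l = true ↔ pvC L (fun i => if (i : Int) < e then 1 else 0) l) := by
  intro l
  induction l with
  | nil =>
    intro _ e he heL
    simp only [pvCur, pvC, pvCnt, List.countP_nil, decide_eq_true_eq]
    constructor
    · rintro rfl
      refine ⟨by simp, fun i hi => by simp [hi]⟩
    · rintro ⟨-, h2⟩
      by_contra hne
      have hlt : e < L := lt_of_le_of_ne heL hne
      have h3 : (if ((e.toNat : Nat) : Int) < e then 1 else 0) + 0 = 1 := h2 e.toNat (by omega)
      rw [Int.toNat_of_nonneg he, if_neg (lt_irrefl e)] at h3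
      omega
  | cons sp l ih =>
    intro hp e he heL
    have hhead : ∀ b ∈ l, pvKey sp "start" ≤ pvKey b "start" := (List.pairwise_cons.mp hp).1
    have htail := (List.pairwise_cons.mp hp).2
    unfold pvCur
    by_cases hc : pvKey sp "start" ≠ e ∨ pvKey sp "start" ≥ pvKey sp "end"
    · rw [if_pos hc]
      constructor
      · intro h; exact absurd h (by simp)
      · rintro ⟨hb, hcnt⟩
        obtain ⟨hb0, hb1, hb2⟩ := hb sp (by simp)
        have hne : pvKey sp "start" ≠ e := by omega
        rcases lt_or_gt_of_ne hne with hlt | hgt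
        · -- s < e : position s is double-covered
          have h3 : (if (((pvKey sp "start").toNat : Nat) : Int) < e then 1 else 0)
              + pvCnt (sp :: l) (pvKey sp "start").toNat = 1 := hcnt _ (by omega)
          rw [Int.toNat_of_nonneg hb0, if_pos hlt, pvCnt, List.countP_cons] at h3
          simp only [decide_eq_true_eq, Int.toNat_of_nonneg hb0] at h3
          rw [if_pos ⟨le_refl _, hb1⟩] at h3
          omega
        · -- s > e : position e is covered by nobody
          have hz : pvCnt (sp :: l) e.toNat = 0 := by
            rw [pvCnt, List.countP_eq_zero]
            intro q hq
            simp only [decide_eq_true_eq, not_and]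
            intro hq1
            rcases List.mem_cons.mp hq with rfl | hq2
            · rw [Int.toNat_of_nonneg he] at hq1; omega
            · have := hhead q hq2
              have hbq := (hb q (List.mem_cons_of_mem _ hq2)).2.1
              rw [Int.toNat_of_nonneg he] at hq1; omega
          have h3 : (if ((e.toNat : Nat) : Int) < e then 1 else 0) + pvCnt (sp :: l) e.toNat = 1 :=
            hcnt _ (by omega)
          rw [Int.toNat_of_nonneg he, if_neg (lt_irrefl e), hz] at h3
          omega
    · rw [if_neg hc]
      push_neg at hc
      obtain ⟨hse, hlt⟩ := hc
      by_cases hL : pvKey sp "end" ≤ L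
      · rw [ih htail (pvKey sp "end") (by omega) hL]
        unfold pvC
        constructor
        · rintro ⟨hb, hcnt⟩
          refine ⟨?_, fun i hi => ?_⟩
          · intro q hq
            rcases List.mem_cons.mp hq with rfl | hq2
            · exact ⟨by omega, hlt, hL⟩
            · exact hb q hq2
          · have h3 : (if (i : Int) < pvKey sp "end" then 1 else 0) + pvCnt l i = 1 := hcnt i hi
            show (if (i : Int) < e then 1 else 0) + pvCnt (sp :: l) i = 1
            rw [pvCnt, List.countP_cons, ← pvCnt]
            simp only [decide_eq_true_eq]
            split_ifs at h3 ⊢ <;> omega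
        · rintro ⟨hb, hcnt⟩
          refine ⟨fun q hq => hb q (List.mem_cons_of_mem _ hq), fun i hi => ?_⟩
          have h3 : (if (i : Int) < e then 1 else 0) + pvCnt (sp :: l) i = 1 := hcnt i hi
          rw [pvCnt, List.countP_cons, ← pvCnt] at h3
          simp only [decide_eq_true_eq] at h3
          show (if (i : Int) < pvKey sp "end" then 1 else 0) + pvCnt l i = 1
          split_ifs at h3 ⊢ <;> omega
      · rw [pvCur_gt L l _ (by omega)]
        constructor
        · intro h; exact absurd h (by simp)
        · rintro ⟨hb, -⟩
          have := (hb sp (by simp)).2.2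
          omega

-- bitmap index lemmas -------------------------------------------------------

theorem pvMark_length (cov : List Bool) (s e : Int) : (pvMark cov s e).length = cov.length := by
  simp [pvMark]

theorem pvAt_mark (cov : List Bool) (s e : Int) (i : Nat) :
    pvAt (pvMark cov s e) i
      = if i < cov.length then (if s ≤ (i : Int) ∧ (i : Int) < e then true else pvAt cov i)
        else false := by
  unfold pvAt pvMark
  by_cases h : i < cov.length
  · rw [List.getD_eq_getElem _ _ (by simpa using h), List.getElem_mapIdx,
      List.getD_eq_getElem _ _ h, if_pos h]
  · rw [List.getD_eq_default _ _ (by simpa using not_lt.mp h), if_neg h]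

theorem pvAt_false_of_ge (cov : List Bool) (i : Nat) (h : cov.length ≤ i) : pvAt cov i = false :=
  List.getD_eq_default _ _ h

theorem anySlice_iff (cov : List Bool) (s e : Int) (h0 : 0 ≤ s) (hse : s ≤ e) :
    ((PySem.List.slice cov (some s) (some e)).any id = true)
      ↔ ∃ i : Nat, s ≤ (i : Int) ∧ (i : Int) < e ∧ pvAt cov i = true := by
  rw [PySem.List.slice_toNat cov h0 (le_trans h0 hse)]
  constructor
  · intro h
    obtain ⟨x, hx, hid⟩ := List.any_eq_true.mp h
    obtain ⟨j, hj, rfl⟩ := List.mem_iff_getElem.mp hx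
    have hj' := hj
    simp only [List.length_take, List.length_drop, lt_min_iff] at hj'
    refine ⟨s.toNat + j, ?_, ?_, ?_⟩
    · push_cast; omega
    · push_cast; omega
    · rw [List.getElem_take, List.getElem_drop] at hid
      unfold pvAt
      rw [List.getD_eq_getElem _ _ (by omega)]
      simpa using hid
  · rintro ⟨i, h1, h2, h3⟩
    have hilen : i < cov.length := by
      by_contra hge
      rw [pvAt_false_of_ge cov i (not_lt.mp hge)] at h3
      exact absurd h3 (by simp)
    refine List.any_eq_true.mpr ⟨cov[i], ?_, ?_⟩
    · refine List.mem_iff_getElem.mpr ⟨i - s.toNat, ?_, ?_⟩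
      · simp only [List.length_take, List.length_drop, lt_min_iff]
        omega
      · rw [List.getElem_take, List.getElem_drop]
        congr 1
        omega
    · unfold pvAt at h3
      rw [List.getD_eq_getElem _ _ hilen] at h3
      simpa using h3

-- bitmap characterization: accept iff pvC with the bitmap base.
theorem pvLoopB_char (L : Int) :
    ∀ (l : List (List (String × Int))) (cov : List Bool), cov.length = L.toNat →
      (pvLoopB L cov l = true ↔ pvC L (fun i => if pvAt cov i then 1 else 0) l) := by
  intro l
  induction l with
  | nil =>
    intro cov hlen
    simp only [pvLoopB, pvC, pvCnt, List.countP_nil]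
    rw [List.all_eq_true]
    constructor
    · rintro h
      refine ⟨by simp, fun i hi => ?_⟩
      have hiL : i < cov.length := by omega
      have : cov[i] = true := by simpa using h cov[i] (List.getElem_mem hiL)
      unfold pvAt
      rw [List.getD_eq_getElem _ _ hiL, this]
      simp
    · rintro ⟨-, h2⟩ x hx
      obtain ⟨i, hi, rfl⟩ := List.mem_iff_getElem.mp hx
      have hiL : (i : Int) < L := by omega
      have := h2 i hiL
      unfold pvAt at this
      rw [List.getD_eq_getElem _ _ hi] at this
      split_ifs at this with hv
      · simpa using hv
      · omega
  | cons sp l ih =>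
    intro cov hlen
    unfold pvLoopB
    by_cases hg : pvKey sp "start" < 0 ∨ pvKey sp "end" > L ∨ pvKey sp "start" ≥ pvKey sp "end"
    · rw [if_pos hg]
      constructor
      · intro h; exact absurd h (by simp)
      · rintro ⟨hb, -⟩
        have := hb sp (by simp)
        omega
    · rw [if_neg hg]
      push_neg at hg
      obtain ⟨hg0, hgL, hglt⟩ := hg
      by_cases ha : (PySem.List.slice cov (some (pvKey sp "start")) (some (pvKey sp "end"))).any id = true
      · rw [if_pos ha]
        obtain ⟨i, hi1, hi2, hi3⟩ := (anySlice_iff cov _ _ hg0 (by omega)).mp ha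
        constructor
        · intro h; exact absurd h (by simp)
        · rintro ⟨hb, hcnt⟩
          have h3 : (if pvAt cov i then 1 else 0) + pvCnt (sp :: l) i = 1 := hcnt i (by omega)
          rw [hi3, pvCnt, List.countP_cons,
            if_pos (show (decide (pvKey sp "start" ≤ (i : Int) ∧ (i : Int) < pvKey sp "end")) = true
              by simp [hi1, hi2])] at h3
          simp at h3
      · rw [if_neg ha]
        rw [ih (pvMark cov (pvKey sp "start") (pvKey sp "end")) (by rw [pvMark_length]; exact hlen)]
        have hnc : ∀ i : Nat, pvKey sp "start" ≤ (i : Int) → (i : Int) < pvKey sp "end" → pvAt cov i = false := by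
          intro i ha1 ha2
          by_contra hne
          exact ha ((anySlice_iff cov _ _ hg0 (by omega)).mpr ⟨i, ha1, ha2, by simpa using hne⟩)
        unfold pvC
        have hkey : ∀ i : Nat, (i : Int) < L →
            (if pvAt (pvMark cov (pvKey sp "start") (pvKey sp "end")) i then 1 else 0) + pvCnt l i
              = (if pvAt cov i then 1 else 0) + pvCnt (sp :: l) i := by
          intro i hi
          simp only [pvCnt, List.countP_cons, decide_eq_true_eq]
          rw [pvAt_mark, if_pos (show i < cov.length by omega)]
          by_cases hin : pvKey sp "start" ≤ (i : Int) ∧ (i : Int) < pvKey sp "end"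
          · rw [if_pos hin, if_pos hin, hnc i hin.1 hin.2]
            simp only [Bool.false_eq_true, if_false, if_true]
            omega
          · rw [if_neg hin, if_neg hin]
            omega
        constructor
        · rintro ⟨hb, hcnt⟩
          refine ⟨?_, fun i hi => by rw [← hkey i hi]; exact hcnt i hi⟩
          intro q hq
          rcases List.mem_cons.mp hq with rfl | hq2
          · exact ⟨hg0, hglt, hgL⟩
          · exact hb q hq2
        · rintro ⟨hb, hcnt⟩
          exact ⟨fun q hq => hb q (List.mem_cons_of_mem _ hq),
                 fun i hi => by rw [hkey i hi]; exact hcnt i hi⟩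

-- pvC is symmetric in the list and pointwise in the base.
theorem pvC_perm (L : Int) (base : Nat → Nat) (l₁ l₂ : List (List (String × Int)))
    (h : l₁.Perm l₂) : pvC L base l₁ ↔ pvC L base l₂ := by
  unfold pvC pvCnt
  constructor <;> rintro ⟨h1, h2⟩
  · exact ⟨fun sp hsp => h1 sp (h.mem_iff.mpr hsp), fun i hi => by rw [← h.countP_eq]; exact h2 i hi⟩
  · exact ⟨fun sp hsp => h1 sp (h.mem_iff.mp hsp), fun i hi => by rw [h.countP_eq]; exact h2 i hi⟩

theorem pvC_base_congr (L : Int) (b₁ b₂ : Nat → Nat) (l : List (List (String × Int)))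
    (h : ∀ i, b₁ i = b₂ i) : pvC L b₁ l ↔ pvC L b₂ l := by
  unfold pvC
  constructor <;> rintro ⟨h1, h2⟩ <;> refine ⟨h1, fun i hi => ?_⟩
  · rw [← h i]; exact h2 i hi
  · rw [h i]; exact h2 i hi

theorem pvLen_nonneg (s : String) : 0 ≤ PySem.Str.len s := by
  simp [PySem.Str.len]

-- ===== VERDICT (by name: the statement is the Claim_ definition above) =====
theorem validate_sentence_bounds_spec : Claim_equal_validate_sentence_bounds := by
  intro sentence spans _ _
  unfold Spec_validate_sentence_bounds validate_sentence_bounds validate_sentence_bounds_alt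
  by_cases hs : spans = []
  · simp [hs]
  · rw [if_neg hs, if_neg hs]
    rcases hss : PySem.List.sorted spans (fun x => pvKey x "start") false with _ | ⟨h, t⟩
    · exact absurd ((PySem.List.sorted_eq_nil_iff spans _ false).mp hss) hs
    · have hL0 : 0 ≤ PySem.Str.len sentence := pvLen_nonneg sentence
      -- A's body equals the cursor run on the sorted list
      have hA : (if pvKey h "start" ≠ 0 then false
                 else if pvKey ((h :: t).getLastD h) "end" ≠ PySem.Str.len sentence then false
                 else pvLoopA (PySem.Str.len sentence) (h :: t))
          = pvCur (PySem.Str.len sentence) 0 (h :: t) := by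
        rw [pvCur_eq (PySem.Str.len sentence) t h 0 le_rfl]
        by_cases h1 : pvKey h "start" = 0
        · by_cases h2 : pvKey ((h :: t).getLastD h) "end" = PySem.Str.len sentence
          · simp [h1, h2, Bool.and_comm]
          · simp [h1, h2, Bool.and_comm]
        · simp [h1]
      -- the sorted list is a permutation of spans and Pairwise-ordered; its head start is min(starts)
      have hperm : (h :: t).Perm spans := by
        have := PySem.List.sorted_perm spans (fun x => pvKey x "start") false
        rwa [hss] at this
      have hpw : (h :: t).Pairwise (fun a b => pvKey a "start" ≤ pvKey b "start") := by
        have := PySem.List.sorted_pairwise spans (fun x => pvKey x "start")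
        rwa [hss] at this
      rcases hm : PySem.List.min? (spans.map (fun span => pvKey span "start")) (fun x => x) with _ | m
      · exact absurd ((PySem.List.min?_eq_none_iff _ _).mp hm) (by simp [hs])
      · have hmem : m ∈ spans.map (fun span => pvKey span "start") := PySem.List.min?_mem hm
        have hmin : ∀ y ∈ spans.map (fun span => pvKey span "start"), m ≤ y :=
          PySem.List.min?_isMin hm
        -- head start of the sorted list equals the minimum m
        have hhm : pvKey h "start" = m := by
          obtain ⟨sp, hsp, hspm⟩ := List.mem_map.mp hmem
          have h1 : pvKey h "start" ≤ pvKey sp "start" :=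
            PySem.List.key_head_sorted_le spans _ hss sp hsp
          have h2 : m ≤ pvKey h "start" :=
            hmin _ (List.mem_map.mpr ⟨h, hperm.mem_iff.mp (by simp), rfl⟩)
          omega
        show (if pvKey h "start" ≠ 0 then false
              else if pvKey ((h :: t).getLastD h) "end" ≠ PySem.Str.len sentence then false
              else pvLoopA (PySem.Str.len sentence) (h :: t))
            = (if m ≠ 0 then false
               else pvLoopB (PySem.Str.len sentence) (List.replicate (PySem.Str.len sentence).toNat false) spans)
        by_cases hm0 : m = 0
        · rw [hA, if_neg (show ¬ (m ≠ 0) by omega)]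
          have hcur := pvCur_char (PySem.Str.len sentence) (h :: t) hpw 0 le_rfl hL0
          have hbit := pvLoopB_char (PySem.Str.len sentence) spans
              (List.replicate (PySem.Str.len sentence).toNat false) (by simp)
          have hbase : ∀ i : Nat, (if (i : Int) < 0 then 1 else 0)
              = (if pvAt (List.replicate (PySem.Str.len sentence).toNat false) i then 1 else 0) := by
            intro i
            have : pvAt (List.replicate (PySem.Str.len sentence).toNat false) i = false := by
              unfold pvAt
              rcases lt_or_ge i (PySem.Str.len sentence).toNat with hlt | hge
              · rw [List.getD_eq_getElem _ _ (by simpa using hlt)]; simp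
              · exact List.getD_eq_default _ _ (by simpa using hge)
            rw [this]
            simp
          rw [Bool.eq_iff_iff, hcur, hbit]
          rw [pvC_base_congr _ _ _ _ hbase]
          exact pvC_perm _ _ _ _ hperm
        · -- minimal start nonzero: A's first-start check fires, B's quick reject fires
          rw [if_pos hm0, if_pos (by omega : pvKey h "start" ≠ 0)]
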